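-- pv_equiv track=rewrite | github.com/10XGenomics/cellranger | lib/python/tenkit/preflight.py | check_gem_groups
-- ===== SOURCE A (Python) =====
-- from collections.abc import Callable, Iterable, Mapping
-- from typing import Literal, NamedTuple, TypedDict
--
-- class SampleDef(TypedDict):
--     gem_group: int | None
--
-- class _SampleDefWithGemGroup(TypedDict):
--     gem_group: int
--
-- def _make_some_gem_group(
--     sample_def: Iterable[SampleDef], all_null: bool
-- ) -> Iterable[_SampleDefWithGemGroup]:
--     """If all gem_groups are set to null, then set them all to 1.
--
--     This is broken out into a separate function in order to make type checkers
--     work better.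
--     """
--     if all_null:
--         for sd in sample_def:
--             sd["gem_group"] = 1
--     return sample_def
--
-- def check_gem_groups(sample_def: Iterable[SampleDef]) -> tuple[bool, str | None]:
--     gem_groups = [sd["gem_group"] for sd in sample_def]
--     all_null = all(x is None for x in gem_groups)
--     all_int = all(isinstance(x, int) for x in gem_groups)
--
--     # Check for self-consistent gem_group settings in the sample_def entries
--     if not (all_null or all_int):
--         return (
--             False,
--             "Inconsistent gem_group tags. Please specify all gem_group tags as null, or all gem_group tags with an integer.",
--         )
--
--     gem_groups_sorted = sorted(sd["gem_group"] for sd in _make_some_gem_group(sample_def, all_null))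
--
--     # Check that numbering starts at 1
--     if len(gem_groups_sorted) > 0 and gem_groups_sorted[0] != 1:
--         return False, "gem_group numbering must start at 1"
--
--     # Check for non-contiguous gem groups
--     prev = 1
--     for group in gem_groups_sorted:
--         if group - prev > 1:
--             return (
--                 False,
--                 f"gem_groups must be numbered contiguously. missing groups: {list(range(prev + 1, group))}",
--             )
--         prev = group
--
--     # Disable multi-GEM well analysis support since it is not enabled in ATAC SLFE
--     if len(set(gem_groups_sorted)) > 1:
--         return (
--             False,
--             """Multi-GEM well analysis is not enabled in `cellranger-[atac|arc] count`. Run \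
-- `cellranger-[atac|arc] count` on each library and then run `cellranger-[atac|arc] aggr`.""",
--         )
--     return True, None
-- ===== SOURCE B (Python) =====
-- def check_gem_groups(sample_def):
--     values = [sd["gem_group"] for sd in sample_def]
--     if any(v is None for v in values) and any(v is not None for v in values):
--         return (
--             False,
--             "Inconsistent gem_group tags. Please specify all gem_group tags as null, or all gem_group tags with an integer.",
--         )
--     if values and values[0] is None:
--         # all values are None: set them all to 1, like A's _make_some_gem_group
--         for sd in sample_def:
--             sd["gem_group"] = 1
--         values = [1] * len(values)
--     groups = set(values)
--     if not groups:
--         return True, None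
--     if min(groups) != 1:
--         return False, "gem_group numbering must start at 1"
--     i = 1
--     while i in groups:
--         i += 1
--     if i <= max(groups):
--         nxt = min(x for x in groups if x > i)
--         return (
--             False,
--             f"gem_groups must be numbered contiguously. missing groups: {list(range(i, nxt))}",
--         )
--     if len(groups) > 1:
--         return (
--             False,
--             """Multi-GEM well analysis is not enabled in `cellranger-[atac|arc] count`. Run \
-- `cellranger-[atac|arc] count` on each library and then run `cellranger-[atac|arc] aggr`.""",
--         )
--     return True, None
-- ===== Notes on version B (the rewrite author's own statement) =====
-- stated objective: alternative
-- what changed: B replaces A's sort-then-adjacent-gap scan by a duplicate-free set with min/max queries and a first-missing-integer scan (no sorting), keeping the same in-place all-null-to-1 mutation and the exact error messages.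
import Mathlib
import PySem

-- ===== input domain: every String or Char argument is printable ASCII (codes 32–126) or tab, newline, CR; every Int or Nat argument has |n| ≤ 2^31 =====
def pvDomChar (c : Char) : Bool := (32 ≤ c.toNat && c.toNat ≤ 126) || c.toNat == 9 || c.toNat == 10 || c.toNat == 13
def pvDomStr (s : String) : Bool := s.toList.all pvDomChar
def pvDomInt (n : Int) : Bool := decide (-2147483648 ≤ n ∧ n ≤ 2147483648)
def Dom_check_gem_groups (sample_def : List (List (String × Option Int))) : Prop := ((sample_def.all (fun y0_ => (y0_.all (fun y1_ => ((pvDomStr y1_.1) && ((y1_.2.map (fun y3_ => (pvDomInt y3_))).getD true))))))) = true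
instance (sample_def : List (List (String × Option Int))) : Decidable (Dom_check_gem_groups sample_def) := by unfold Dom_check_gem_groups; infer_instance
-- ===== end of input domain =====

-- B replaces A's sort-then-adjacent-gap scan by a set with min/max and a first-missing-integer
-- scan (objective: alternative).  Equivalence is about the RETURN value; both Pythons perform
-- the same in-place mutation (setting all-null gem_groups to 1) on sample_def.

-- ===== PORT A =====

-- str(list(range(a, b))) — shared output formatting: "[a, a+1, …]"
def pyStrIntList (l : List Int) : String :=
  "[" ++ PySem.Str.join ", " (l.map PySem.Int.toStr) ++ "]"

-- A's contiguity loop: first adjacent pair with a gap > 1, starting from prev = 1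
def gapScan : Int → List Int → Option (Int × Int)
  | _, [] => none
  | prev, g :: rest => if g - prev > 1 then some (prev, g) else gapScan g rest

def check_gem_groups (sample_def : List (List (String × Option Int))) : Bool × Option String :=
  -- sd["gem_group"]: a missing key is a KeyError in Python, excluded by Pre_ (getD none is exact under Pre_)
  let gem_groups : List (Option Int) :=
    sample_def.map (fun sd => ((PySem.Dict.ofList sd).get? "gem_group").getD none)
  let all_null := gem_groups.all (fun x => x == none)
  let all_int := gem_groups.all (fun x => x.isSome)
  if !(all_null || all_int) then
    (false, some "Inconsistent gem_group tags. Please specify all gem_group tags as null, or all gem_group tags with an integer.")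
  else
    -- after _make_some_gem_group: if all_null every sd["gem_group"] reads 1; else all are ints (getD 0 exact under all_int)
    let gem_groups_sorted : List Int :=
      PySem.List.sorted (if all_null then gem_groups.map (fun _ => (1 : Int)) else gem_groups.map (fun o => o.getD 0)) (fun x => x) false
    if gem_groups_sorted.length > 0 && !((PySem.List.pyGet? gem_groups_sorted 0).getD 1 == 1) then
      (false, some "gem_group numbering must start at 1")
    else
      match gapScan 1 gem_groups_sorted with
      | some (prev, group) =>
          (false, some ("gem_groups must be numbered contiguously. missing groups: " ++ pyStrIntList (PySem.List.pyRange (prev + 1) group 1)))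
      | none =>
          if PySem.Set.len (PySem.Set.ofList gem_groups_sorted) > 1 then
            (false, some "Multi-GEM well analysis is not enabled in `cellranger-[atac|arc] count`. Run `cellranger-[atac|arc] count` on each library and then run `cellranger-[atac|arc] aggr`.")
          else (true, none)

-- ===== PORT B =====

-- B's 'while i in groups: i += 1'; the fuel groups.length + 1 suffices: the distinct
-- members of groups cannot cover that many consecutive integers (see firstMissing_spec below)
def firstMissing (s : List Int) : Nat → Int → Int
  | 0, i => i
  | fuel + 1, i => if s.contains i then firstMissing s fuel (i + 1) else i

def check_gem_groups_alt (sample_def : List (List (String × Option Int))) : Bool × Option String :=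
  let values : List (Option Int) :=
    sample_def.map (fun sd => ((PySem.Dict.ofList sd).get? "gem_group").getD none)
  if (values.any fun v => v == none) && (values.any fun v => v.isSome) then
    (false, some "Inconsistent gem_group tags. Please specify all gem_group tags as null, or all gem_group tags with an integer.")
  else
    -- if values and values[0] is None: all-null case, values become [1] * len(values)
    let vals : List Int :=
      match values with
      | none :: _ => List.replicate values.length 1
      | _ => values.map (fun o => o.getD 0)
    let groups : PySem.Set Int := PySem.Set.ofList vals
    if groups.isEmpty then (true, none)
    else if !((PySem.List.min? groups (fun x => x)).getD 0 == 1) then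
      (false, some "gem_group numbering must start at 1")
    else
      let i := firstMissing groups (groups.length + 1) 1
      if i ≤ (PySem.List.max? groups (fun x => x)).getD 0 then
        let nxt := (PySem.List.min? (groups.filter fun x => decide (i < x)) (fun x => x)).getD 0
        (false, some ("gem_groups must be numbered contiguously. missing groups: " ++ pyStrIntList (PySem.List.pyRange i nxt 1)))
      else if PySem.Set.len groups > 1 then
        (false, some "Multi-GEM well analysis is not enabled in `cellranger-[atac|arc] count`. Run `cellranger-[atac|arc] count` on each library and then run `cellranger-[atac|arc] aggr`.")
      else (true, none)

-- ===== PRECONDITION & SPEC =====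
-- Pre_ excludes only inputs where some entry lacks the "gem_group" key: there Python A raises KeyError.
def Pre_check_gem_groups (sample_def : List (List (String × Option Int))) : Prop :=
  ∀ sd ∈ sample_def, (PySem.Dict.ofList sd).contains "gem_group" = true
instance (sample_def : List (List (String × Option Int))) : Decidable (Pre_check_gem_groups sample_def) := by unfold Pre_check_gem_groups; infer_instance

def pvWitness_check_gem_groups : (List (List (String × Option Int))) :=
  [[("gem_group", some 1)], [("gem_group", some 2)]]

def Spec_check_gem_groups (sample_def : List (List (String × Option Int))) (out : Bool × Option String) : Prop := out = check_gem_groups_alt sample_def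
instance (sample_def : List (List (String × Option Int))) (out : Bool × Option String) : Decidable (Spec_check_gem_groups sample_def out) := by unfold Spec_check_gem_groups; infer_instance

-- ===== CLAIM (what is proved, stated in full; the proofs are below) =====
def Claim_equal_check_gem_groups : Prop := ∀ (sample_def : List (List (String × Option Int))), Dom_check_gem_groups sample_def → Pre_check_gem_groups sample_def → Spec_check_gem_groups sample_def (check_gem_groups sample_def)

-- ===== LEMMAS AND PROOFS =====

-- proof-only names for the two value lists and the two tails (defeq to what the ports compute)
def bVals (values : List (Option Int)) : List Int :=
  match values with
  | none :: _ => List.replicate values.length 1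
  | _ => values.map (fun o => o.getD 0)

def tailA (vs : List Int) : Bool × Option String :=
  let gem_groups_sorted : List Int := PySem.List.sorted vs (fun x => x) false
  if gem_groups_sorted.length > 0 && !((PySem.List.pyGet? gem_groups_sorted 0).getD 1 == 1) then
    (false, some "gem_group numbering must start at 1")
  else
    match gapScan 1 gem_groups_sorted with
    | some (prev, group) =>
        (false, some ("gem_groups must be numbered contiguously. missing groups: " ++ pyStrIntList (PySem.List.pyRange (prev + 1) group 1)))
    | none =>
        if PySem.Set.len (PySem.Set.ofList gem_groups_sorted) > 1 then
          (false, some "Multi-GEM well analysis is not enabled in `cellranger-[atac|arc] count`. Run `cellranger-[atac|arc] count` on each library and then run `cellranger-[atac|arc] aggr`.")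
        else (true, none)

def tailB (vs : List Int) : Bool × Option String :=
  let groups : PySem.Set Int := PySem.Set.ofList vs
  if groups.isEmpty then (true, none)
  else if !((PySem.List.min? groups (fun x => x)).getD 0 == 1) then
    (false, some "gem_group numbering must start at 1")
  else
    let i := firstMissing groups (groups.length + 1) 1
    if i ≤ (PySem.List.max? groups (fun x => x)).getD 0 then
      let nxt := (PySem.List.min? (groups.filter fun x => decide (i < x)) (fun x => x)).getD 0
      (false, some ("gem_groups must be numbered contiguously. missing groups: " ++ pyStrIntList (PySem.List.pyRange i nxt 1)))
    else if PySem.Set.len groups > 1 then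
      (false, some "Multi-GEM well analysis is not enabled in `cellranger-[atac|arc] count`. Run `cellranger-[atac|arc] count` on each library and then run `cellranger-[atac|arc] aggr`.")
    else (true, none)

-- A's inconsistency test equals B's: not(all-null or all-int) <-> (some None and some int)
lemma cond_eq (values : List (Option Int)) :
    ((values.any fun v => v == none) && (values.any fun v => v.isSome))
      = !((values.all fun x => x == none) || (values.all fun x => x.isSome)) := by
  rw [List.any_eq_not_all_not, List.any_eq_not_all_not]
  have e1 : (fun v : Option Int => !(v == none)) = fun v => v.isSome := funext fun v => by cases v <;> rfl
  have e2 : (fun v : Option Int => !v.isSome) = fun v => v == none := funext fun v => by cases v <;> rfl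
  rw [e1, e2, Bool.not_or, Bool.and_comm]

-- under consistency, A's post-mutation value list equals B's
lemma vals_eq (values : List (Option Int))
    (h : ((values.all fun x => x == none) || (values.all fun x => x.isSome)) = true) :
    (if values.all (fun x => x == none) then values.map (fun _ => (1 : Int)) else values.map (fun o => o.getD 0))
      = bVals values := by
  cases values with
  | nil => simp [bVals]
  | cons v t =>
    cases v with
    | none =>
      have hnull : ((none :: t).all fun x => (x == none)) = true := by
        rcases Bool.or_eq_true_iff.mp h with h' | h'
        · exact h'
        · exact absurd h' (by simp)
      rw [if_pos hnull]
      simpa [bVals] using List.map_const' (l := (none : Option Int) :: t) (b := (1 : Int))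
    | some a => simp [bVals]

-- gapScan found no gap: the sorted chain from prev covers every integer below some member
lemma gapScan_none (s : List Int) (prev : Int) (h : gapScan prev s = none) :
    ∀ k : Int, prev < k → (∃ x ∈ s, k ≤ x) → k ∈ s := by
  induction s generalizing prev with
  | nil => rintro k - ⟨x, hx, -⟩; exact absurd hx (List.not_mem_nil)
  | cons g rest ih =>
    intro k hk hex
    simp only [gapScan] at h
    split at h
    · exact absurd h (by simp)
    · rename_i hle
      rcases hex with ⟨x, hx, hkx⟩
      rcases List.mem_cons.mp hx with rfl | hx'
      · have : k = x := by omega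
        exact this ▸ List.mem_cons_self
      · by_cases hkg : k ≤ g
        · have : k = g := by omega
          exact this ▸ List.mem_cons_self
        · exact List.mem_cons_of_mem _ (ih g h k (by omega) ⟨x, hx', hkx⟩)

-- gapScan found a gap (p, g): everything in (prev, p] is present, nothing lies strictly between p and g
lemma gapScan_some (s : List Int) (prev p g : Int)
    (hpw : s.Pairwise (· ≤ ·)) (hlb : ∀ x ∈ s, prev ≤ x) (h : gapScan prev s = some (p, g)) :
    g ∈ s ∧ p + 2 ≤ g ∧ prev ≤ p ∧ (∀ k : Int, prev < k → k ≤ p → k ∈ s) ∧ (∀ x ∈ s, x ≤ p ∨ g ≤ x) := by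
  induction s generalizing prev with
  | nil => exact absurd h (by simp [gapScan])
  | cons a rest ih =>
    simp only [gapScan] at h
    rcases List.pairwise_cons.mp hpw with ⟨ha, hpw'⟩
    split at h
    · rename_i hgap
      obtain ⟨rfl, rfl⟩ : prev = p ∧ a = g := by
        have := Option.some.inj h; exact ⟨congrArg Prod.fst this, congrArg Prod.snd this⟩
      refine ⟨List.mem_cons_self, by omega, le_refl _, fun k h1 h2 => absurd (lt_of_lt_of_le h1 h2) (lt_irrefl _), ?_⟩
      intro x hx
      rcases List.mem_cons.mp hx with rfl | hx'
      · exact Or.inr (le_refl _)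
      · exact Or.inr (ha x hx')
    · rename_i hle
      have hlb' : ∀ x ∈ rest, a ≤ x := ha
      obtain ⟨hg, hgap, hap, hcov, hsplit⟩ := ih a hpw' hlb' h
      have hpa : prev ≤ a := hlb a List.mem_cons_self
      refine ⟨List.mem_cons_of_mem _ hg, hgap, le_trans hpa hap, ?_, ?_⟩
      · intro k h1 h2
        by_cases hka : k ≤ a
        · have : k = a := by omega
          exact this ▸ List.mem_cons_self
        · exact List.mem_cons_of_mem _ (hcov k (by omega) h2)
      · intro x hx
        rcases List.mem_cons.mp hx with rfl | hx'
        · exact Or.inl hap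
        · exact hsplit x hx'

-- firstMissing returns the least i' ≥ i outside s, provided some integer in [i, i+fuel) is outside s
lemma firstMissing_spec (s : List Int) :
    ∀ (fuel : Nat) (i : Int), (∃ j : Int, i ≤ j ∧ j < i + fuel ∧ s.contains j = false) →
      s.contains (firstMissing s fuel i) = false ∧ i ≤ firstMissing s fuel i ∧
        ∀ k : Int, i ≤ k → k < firstMissing s fuel i → s.contains k = true := by
  intro fuel
  induction fuel with
  | zero => rintro i ⟨j, h1, h2, -⟩; exact absurd h2 (by push_cast; omega)
  | succ n ih =>
    rintro i ⟨j, h1, h2, h3⟩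
    simp only [firstMissing]
    by_cases hi : s.contains i = true
    · rw [if_pos hi]
      have hji : j ≠ i := fun e => by rw [e] at h3; rw [h3] at hi; exact Bool.false_ne_true hi
      obtain ⟨c1, c2, c3⟩ := ih (i + 1) ⟨j, by omega, by push_cast at h2 ⊢; omega, h3⟩
      refine ⟨c1, by omega, fun k hk1 hk2 => ?_⟩
      by_cases hki : k = i
      · exact hki ▸ hi
      · exact c3 k (by omega) hk2
    · rw [if_neg hi]
      exact ⟨Bool.not_eq_true _ ▸ (by simpa using hi), le_refl i, fun k hk1 hk2 => absurd (lt_of_le_of_lt hk1 hk2) (lt_irrefl _)⟩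

-- pigeonhole: a duplicate-free list of n integers cannot contain all of i, i+1, ..., i+n
lemma exists_missing (s : List Int) (i : Int) :
    ∃ j : Int, i ≤ j ∧ j < i + (s.length + 1 : Nat) ∧ s.contains j = false := by
  by_contra hcon
  push Not at hcon
  have hall : ∀ j : Int, i ≤ j → j < i + (s.length + 1 : Nat) → j ∈ s := by
    intro j h1 h2
    have h3 := hcon j h1 h2
    have h4 : s.contains j = true := by
      cases hc : s.contains j
      · exact absurd hc h3
      · rfl
    exact List.contains_iff_mem.mp h4
  have hnodL : (List.map (fun k : Nat => i + (k : Int)) (List.range (s.length + 1))).Nodup := by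
    refine List.Nodup.map ?_ List.nodup_range
    intro a b hab
    have hab' : i + (a : Int) = i + (b : Int) := hab
    omega
  have hsub : (List.map (fun k : Nat => i + (k : Int)) (List.range (s.length + 1))) ⊆ s := by
    intro x hx
    rcases List.mem_map.mp hx with ⟨k, hk, rfl⟩
    have hk' := List.mem_range.mp hk
    exact hall _ (by omega) (by push_cast; omega)
  have hlen := (List.subperm_of_subset hnodL hsub).length_le
  simp at hlen

-- dedup of a permutation has the same size
lemma ofList_length_eq_of_perm (xs ys : List Int) (h : xs.Perm ys) :
    (PySem.Set.ofList xs).length = (PySem.Set.ofList ys).length := by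
  refine List.Perm.length_eq ?_
  rw [List.perm_ext_iff_of_nodup (PySem.Set.nodup_ofList xs) (PySem.Set.nodup_ofList ys)]
  intro a
  rw [PySem.Set.mem_ofList, PySem.Set.mem_ofList]
  exact h.mem_iff

-- the heart: A's tail on the sorted list equals B's tail on the set, for any value list vs
lemma tail_eq (vs : List Int) : tailA vs = tailB vs := by
  simp only [tailA, tailB]
  cases hsrt : PySem.List.sorted vs (fun x => x) false with
  | nil =>
    have hvs : vs = [] := (PySem.List.sorted_eq_nil_iff vs (fun x => x) false).mp hsrt
    subst hvs
    rfl
  | cons h0 t =>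
    have hperm : (PySem.List.sorted vs (fun x => x) false).Perm vs := PySem.List.sorted_perm vs _ _
    have hpw : (PySem.List.sorted vs (fun x => x) false).Pairwise (· ≤ ·) := PySem.List.sorted_pairwise vs (fun x => x)
    have hmemG : ∀ a : Int, a ∈ PySem.Set.ofList vs ↔ a ∈ vs := fun a => PySem.Set.mem_ofList vs a
    have hmemS : ∀ a : Int, a ∈ (h0 :: t) ↔ a ∈ vs := by
      intro a; rw [← hsrt]; exact (PySem.List.sorted_perm vs _ _).mem_iff
    have hGne : (PySem.Set.ofList vs : List Int) ≠ [] := by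
      intro e
      have : h0 ∈ vs := (hmemS h0).mp List.mem_cons_self
      have := (hmemG h0).mpr this
      rw [e] at this
      exact absurd this List.not_mem_nil
    have hGempty : (PySem.Set.ofList vs : List Int).isEmpty = false := by
      cases e : (PySem.Set.ofList vs : List Int) with
      | nil => exact absurd e hGne
      | cons a b => rfl
    obtain ⟨m, hm⟩ : ∃ m, PySem.List.min? (PySem.Set.ofList vs) (fun x => x) = some m := by
      cases e : PySem.List.min? (PySem.Set.ofList vs) (fun x => x) with
      | none => exact absurd ((PySem.List.min?_eq_none_iff _ _).mp e) hGne
      | some m => exact ⟨m, rfl⟩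
    have hmmem : m ∈ vs := (hmemG m).mp (PySem.List.min?_mem hm)
    have hmmin : ∀ y ∈ vs, m ≤ y := fun y hy => PySem.List.min?_isMin hm y ((hmemG y).mpr hy)
    have hh0le : ∀ y ∈ vs, h0 ≤ y := PySem.List.key_head_sorted_le vs (fun x => x) hsrt
    have hh0mem : h0 ∈ vs := (hmemS h0).mp List.mem_cons_self
    have hmh0 : m = h0 := le_antisymm (hmmin h0 hh0mem) (hh0le m hmmem)
    rw [hm, hGempty]
    simp only [Bool.false_eq_true, if_false, Option.getD_some]
    by_cases h1 : h0 = 1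
    · -- numbering starts at 1 on both sides
      have hA1 : (decide ((h0 :: t).length > 0) && !((PySem.List.pyGet? (h0 :: t) 0).getD 1 == 1)) = false := by
        subst h1
        simp [PySem.List.pyGet?, PySem.List.pyIdx?]
      have hB1 : (!(m == 1)) = false := by
        rw [hmh0, h1]; rfl
      simp only [hA1, hB1, Bool.false_eq_true, if_false]
      -- contiguity
      have hlb : ∀ x ∈ (h0 :: t), (1 : Int) ≤ x := by
        intro x hx
        have := hh0le x ((hmemS x).mp hx)
        omega
      obtain ⟨M, hM⟩ : ∃ M, PySem.List.max? (PySem.Set.ofList vs) (fun x => x) = some M := by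
        cases e : PySem.List.max? (PySem.Set.ofList vs) (fun x => x) with
        | none => exact absurd ((PySem.List.max?_eq_none_iff _ _).mp e) hGne
        | some M => exact ⟨M, rfl⟩
      have hMmem : M ∈ vs := (hmemG M).mp (PySem.List.max?_mem hM)
      have hMmax : ∀ y ∈ vs, y ≤ M := fun y hy => PySem.List.max?_isMax hM y ((hmemG y).mpr hy)
      simp only [hM, Option.getD_some]
      obtain ⟨hiNot, hi1, hleast⟩ :=
        firstMissing_spec (PySem.Set.ofList vs) ((PySem.Set.ofList vs : List Int).length + 1) 1
          (exists_missing _ 1)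
      set i := firstMissing (PySem.Set.ofList vs) ((PySem.Set.ofList vs : List Int).length + 1) 1 with hidef
      have hcontains : ∀ a : Int, List.contains (PySem.Set.ofList vs) a = true ↔ a ∈ vs := by
        intro a; rw [List.contains_iff_mem]; exact hmemG a
      have hi2 : 2 ≤ i := by
        have h1mem : List.contains (PySem.Set.ofList vs) 1 = true := (hcontains 1).mpr (h1 ▸ hh0mem)
        rcases eq_or_lt_of_le hi1 with e | lt
        · rw [e] at h1mem; rw [h1mem] at hiNot; exact absurd hiNot (by simp)
        · omega
      cases hscan : gapScan 1 (h0 :: t) with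
      | none =>
        have hnogap := gapScan_none (h0 :: t) 1 hscan
        have hiM : ¬ (i ≤ M) := by
          intro hle
          have : i ∈ (h0 :: t) := hnogap i (by omega) ⟨M, (hmemS M).mpr hMmem, hle⟩
          have := (hcontains i).mpr ((hmemS i).mp this)
          rw [this] at hiNot; exact absurd hiNot (by simp)
        rw [if_neg hiM]
        have hlen : PySem.Set.len (PySem.Set.ofList (h0 :: t)) = PySem.Set.len (PySem.Set.ofList vs) := by
          simp only [PySem.Set.len]
          rw [ofList_length_eq_of_perm (h0 :: t) vs (hsrt ▸ hperm)]
        rw [hlen]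
      | some pg =>
        obtain ⟨p, g⟩ := pg
        obtain ⟨hg, hpg, hp1, hcov, hsplit⟩ := gapScan_some (h0 :: t) 1 p g (hsrt ▸ hpw) hlb hscan
        have hgvs : g ∈ vs := (hmemS g).mp hg
        have hip : i = p + 1 := by
          have hp1not : List.contains (PySem.Set.ofList vs) (p + 1) = false := by
            cases e : List.contains (PySem.Set.ofList vs) (p + 1)
            · rfl
            · have := (hmemS (p + 1)).mpr ((hcontains (p + 1)).mp e)
              rcases hsplit (p + 1) this with h' | h' <;> omega
          rcases lt_trichotomy i (p + 1) with hlt | heq | hgt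
          · exfalso
            have : i ∈ (h0 :: t) := hcov i (by omega) (by omega)
            have := (hcontains i).mpr ((hmemS i).mp this)
            rw [this] at hiNot; exact absurd hiNot (by simp)
          · exact heq
          · exfalso
            have := hleast (p + 1) (by omega) hgt
            rw [this] at hp1not; exact absurd hp1not (by simp)
        have hiM : i ≤ M := by
          have := hMmax g hgvs
          omega
        rw [if_pos hiM]
        obtain ⟨nxt, hnxt⟩ : ∃ nxt, PySem.List.min? ((PySem.Set.ofList vs).filter fun x => decide (i < x)) (fun x => x) = some nxt := by
          cases e : PySem.List.min? ((PySem.Set.ofList vs).filter fun x => decide (i < x)) (fun x => x) with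
          | none =>
            exfalso
            have hgf : g ∈ (PySem.Set.ofList vs).filter fun x => decide (i < x) := by
              rw [List.mem_filter]
              exact ⟨(hmemG g).mpr hgvs, by simp; omega⟩
            rw [(PySem.List.min?_eq_none_iff _ _).mp e] at hgf
            exact absurd hgf List.not_mem_nil
          | some nxt => exact ⟨nxt, rfl⟩
        have hnxtg : nxt = g := by
          have hmemF := List.mem_filter.mp (PySem.List.min?_mem hnxt)
          have hle : nxt ≤ g := by
            refine PySem.List.min?_isMin hnxt g ?_
            rw [List.mem_filter]
            exact ⟨(hmemG g).mpr hgvs, by simp; omega⟩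
          have hnxtvs : nxt ∈ vs := (hmemG nxt).mp hmemF.1
          have hgtnxt : i < nxt := by simpa using hmemF.2
          rcases hsplit nxt ((hmemS nxt).mpr hnxtvs) with h' | h' <;> omega
        simp only [hnxt, Option.getD_some]
        rw [hip, hnxtg]
    · -- head differs from 1: both report the start-at-1 error
      have hA1 : (decide ((h0 :: t).length > 0) && !((PySem.List.pyGet? (h0 :: t) 0).getD 1 == 1)) = true := by
        simp [PySem.List.pyGet?, PySem.List.pyIdx?, h1]
      have hB1 : (!(m == 1)) = true := by
        rw [hmh0]; simp [h1]
      simp only [hA1, hB1]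
      simp

-- A's whole body equals B's whole body, as functions of the common value list
lemma main_eq (values : List (Option Int)) :
    (if !((values.all fun x => x == none) || (values.all fun x => x.isSome)) then
       ((false, some "Inconsistent gem_group tags. Please specify all gem_group tags as null, or all gem_group tags with an integer.") : Bool × Option String)
     else
       tailA (if values.all (fun x => x == none) then values.map (fun _ => (1 : Int)) else values.map (fun o => o.getD 0)))
    = (if (values.any fun v => v == none) && (values.any fun v => v.isSome) then
         ((false, some "Inconsistent gem_group tags. Please specify all gem_group tags as null, or all gem_group tags with an integer.") : Bool × Option String)
       else
         tailB (bVals values)) := by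
  rw [cond_eq]
  by_cases h : ((values.all fun x => x == none) || (values.all fun x => x.isSome)) = true
  · simp only [h, Bool.not_true, Bool.false_eq_true, if_false]
    rw [vals_eq values h]
    exact tail_eq _
  · simp only [Bool.not_eq_true, Bool.or_eq_false_iff] at h
    obtain ⟨ha, hb⟩ := h
    simp only [List.all_eq_false] at ha hb
    simp_all

-- ===== VERDICT (by name: the statement is the Claim_ definition above) =====
theorem check_gem_groups_spec : Claim_equal_check_gem_groups :=
  fun sample_def _ _ =>
    main_eq (sample_def.map (fun sd => ((PySem.Dict.ofList sd).get? "gem_group").getD none))
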